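-- pv_equiv track=rewrite | github.com/udaykumarswamy/cancer-assessor | src/ingestion/chunker.py | _protect_tables
-- ===== SOURCE A (Python) =====
-- def _protect_tables(text: str) -> str:
--     """Keep markdown tables as single units."""
--     lines = text.split('\n')
--     result = []
--     table_lines = []
--     in_table = False
--
--     for line in lines:
--         is_table_line = line.strip().startswith('|') and line.strip().endswith('|')
--
--         if is_table_line:
--             if not in_table:
--                 if result and result[-1].strip():
--                     result.append('')
--             in_table = True
--             table_lines.append(line)
--         else:
--             if in_table:
--                 result.append('\n'.join(table_lines))
--                 result.append('')
--                 table_lines = []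
--                 in_table = False
--             result.append(line)
--
--     if table_lines:
--         result.append('\n'.join(table_lines))
--
--     return '\n'.join(result)
-- ===== SOURCE B (Python) =====
-- def _protect_tables(text: str) -> str:
--     """Keep markdown tables as single units."""
--     lines = text.split('\n')
--
--     def is_table(line):
--         s = line.strip()
--         return s.startswith('|') and s.endswith('|')
--
--     out = []
--     prev_table = False
--     i = 0
--     n = len(lines)
--     while i < n:
--         k = is_table(lines[i])
--         j = i + 1
--         while j < n and is_table(lines[j]) == k:
--             j += 1
--         run = lines[i:j]
--         if k:
--             if out and out[-1].strip():
--                 out.append('')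
--             out.append('\n'.join(run))
--         else:
--             if prev_table:
--                 out.append('')
--             out.extend(run)
--         prev_table = k
--         i = j
--     return '\n'.join(out)
-- ===== Notes on version B (the rewrite author's own statement) =====
-- stated objective: alternative
-- what changed: Replaces A's per-line state machine (in_table flag plus a pending table_lines buffer flushed on transitions and at the end) by first grouping the lines into maximal runs of table / non-table lines and then folding once over whole runs with only a prev_was_table flag.
import Mathlib
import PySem

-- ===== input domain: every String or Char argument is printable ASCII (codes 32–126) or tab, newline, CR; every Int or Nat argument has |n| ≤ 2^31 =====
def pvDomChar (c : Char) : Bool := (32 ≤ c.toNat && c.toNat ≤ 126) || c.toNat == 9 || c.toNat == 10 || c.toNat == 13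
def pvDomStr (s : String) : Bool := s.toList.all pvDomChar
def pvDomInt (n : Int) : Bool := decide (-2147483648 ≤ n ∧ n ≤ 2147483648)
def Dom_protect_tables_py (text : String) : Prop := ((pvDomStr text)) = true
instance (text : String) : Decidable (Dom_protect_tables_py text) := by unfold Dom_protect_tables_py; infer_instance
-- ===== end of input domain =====

-- B groups the lines into maximal table/non-table runs first and folds over runs; A toggles a per-line state machine. Same return value (alternative decomposition, no speed claim).

-- ===== PORT A =====
-- line.strip().startswith('|') and line.strip().endswith('|')
def pvIsTable (line : String) : Bool :=
  PySem.Str.startswith (PySem.Str.strip line) "|" && PySem.Str.endswith (PySem.Str.strip line) "|"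

-- one iteration of A's for-loop; state = (result, table_lines, in_table)
def pvStepA (st : List String × List String × Bool) (line : String) :
    List String × List String × Bool :=
  match st with
  | (result, table_lines, in_table) =>
    if pvIsTable line then
      let result :=
        if in_table then result
        else if result ≠ [] ∧ PySem.Str.strip (result.getLast!) ≠ "" then result ++ [""]
        else result
      (result, table_lines ++ [line], true)
    else
      if in_table then
        (result ++ [PySem.Str.join "\n" table_lines, "", line], [], false)
      else (result ++ [line], [], false)

def protect_tables_py (text : String) : String :=
  let lines := (PySem.Str.split? text "\n").getD []
  let st := lines.foldl pvStepA ([], [], false)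
  let result := if st.2.1 ≠ [] then st.1 ++ [PySem.Str.join "\n" st.2.1] else st.1
  PySem.Str.join "\n" result

-- ===== PORT B =====
-- maximal runs of lines with equal pvIsTable key (the two while loops of Source B: span off the run, recurse on the rest)
def pvRuns : List String → List (Bool × List String)
  | [] => []
  | x :: xs =>
    let k := pvIsTable x
    (k, x :: xs.takeWhile (fun y => pvIsTable y == k)) ::
      pvRuns (xs.dropWhile (fun y => pvIsTable y == k))
termination_by l => l.length
decreasing_by
  exact Nat.lt_succ_of_le (List.length_dropWhile_le _ _)

-- one run processed; state = (out, prev_table)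
def pvStepB (st : List String × Bool) (r : Bool × List String) : List String × Bool :=
  match st with
  | (out, prev_table) =>
    if r.1 then
      let out := if out ≠ [] ∧ PySem.Str.strip (out.getLast!) ≠ "" then out ++ [""] else out
      (out ++ [PySem.Str.join "\n" r.2], true)
    else
      let out := if prev_table then out ++ [""] else out
      (out ++ r.2, false)

def protect_tables_py_alt (text : String) : String :=
  let lines := (PySem.Str.split? text "\n").getD []
  let st := (pvRuns lines).foldl pvStepB ([], false)
  PySem.Str.join "\n" st.1

-- ===== PRECONDITION & SPEC =====
def Spec_protect_tables_py (text : String) (out : String) : Prop := out = protect_tables_py_alt text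
instance (text : String) (out : String) : Decidable (Spec_protect_tables_py text out) := by unfold Spec_protect_tables_py; infer_instance

-- ===== CLAIM (what is proved, stated in full; the proofs are below) =====
def Claim_equal_protect_tables_py : Prop := ∀ (text : String), Dom_protect_tables_py text → Spec_protect_tables_py text (protect_tables_py text)

-- ===== LEMMAS AND PROOFS =====

-- A over an all-table run while already in_table just accumulates into table_lines
theorem foldA_table_in (run : List String) (res tls : List String)
    (h : ∀ l ∈ run, pvIsTable l = true) :
    run.foldl pvStepA (res, tls, true) = (res, tls ++ run, true) := by
  induction run generalizing tls with
  | nil => simp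
  | cons x xs ih =>
    have hx : pvIsTable x = true := h x (by simp)
    simp only [List.foldl_cons, pvStepA, hx, if_pos]
    rw [ih (tls ++ [x]) (fun l hl => h l (by simp [hl]))]
    simp

-- A over an all-non-table run while not in_table just appends the lines
theorem foldA_plain (run : List String) (res : List String)
    (h : ∀ l ∈ run, pvIsTable l = false) :
    run.foldl pvStepA (res, [], false) = (res ++ run, [], false) := by
  induction run generalizing res with
  | nil => simp
  | cons x xs ih =>
    have hx : pvIsTable x = false := h x (by simp)
    simp only [List.foldl_cons, pvStepA, hx, Bool.false_eq_true, if_false]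
    rw [ih (res ++ [x]) (fun l hl => h l (by simp [hl]))]
    simp

theorem mem_takeWhile_key {k : Bool} {xs : List String} {y : String}
    (h : y ∈ xs.takeWhile (fun z => pvIsTable z == k)) : pvIsTable y = k := by
  have := List.mem_takeWhile_imp h
  simpa using this

theorem head_dropWhile_key (k : Bool) (xs : List String) (y : String)
    (h : (xs.dropWhile (fun z => pvIsTable z == k)).head? = some y) : pvIsTable y ≠ k := by
  have hh := List.head?_dropWhile_not (fun z => pvIsTable z == k) xs
  rw [h] at hh
  simpa using hh

-- the relating invariant between A's state and B's, at a run boundary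
def pvRel (res tls : List String) (inb : Bool) (out : List String) : Prop :=
  if inb then tls ≠ [] ∧ out = res ++ [PySem.Str.join "\n" tls]
  else tls = [] ∧ out = res

-- main induction: from related states at a run boundary, the final joined strings agree
theorem main_lemma (n : Nat) : ∀ (lines res tls : List String) (inb : Bool) (out : List String),
    lines.length ≤ n →
    pvRel res tls inb out →
    (inb = true → ∀ y ∈ lines.head?, pvIsTable y = false) →
    (let st := lines.foldl pvStepA (res, tls, inb)
     if st.2.1 ≠ [] then st.1 ++ [PySem.Str.join "\n" st.2.1] else st.1) =
    ((pvRuns lines).foldl pvStepB (out, inb)).1 := by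
  induction n with
  | zero =>
    intro lines res tls inb out hlen hrel _
    have : lines = [] := List.length_eq_zero_iff.mp (Nat.le_zero.mp hlen)
    subst this
    cases inb with
    | false =>
      obtain ⟨h1, h2⟩ := hrel
      simp [pvRuns, h1, h2]
    | true =>
      obtain ⟨h1, h2⟩ := hrel
      simp [pvRuns, h1, h2]
  | succ n ih =>
    intro lines res tls inb out hlen hrel hhead
    match lines with
    | [] =>
      cases inb with
      | false => obtain ⟨h1, h2⟩ := hrel; simp [pvRuns, h1, h2]
      | true => obtain ⟨h1, h2⟩ := hrel; simp [pvRuns, h1, h2]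
    | x :: xs =>
      set k := pvIsTable x with hk
      set tw := xs.takeWhile (fun y => pvIsTable y == k) with htw
      set dw := xs.dropWhile (fun y => pvIsTable y == k) with hdw
      have hsplit : x :: xs = (x :: tw) ++ dw := by
        simp [htw, hdw, List.takeWhile_append_dropWhile]
      have hruns : pvRuns (x :: xs) = (k, x :: tw) :: pvRuns dw := by
        rw [pvRuns]
      have hdwlen : dw.length ≤ n := by
        rw [hdw]
        have := List.length_dropWhile_le (fun y => pvIsTable y == k) xs
        simp at hlen
        omega
      have hdwhead : ∀ y ∈ dw.head?, pvIsTable y ≠ k := by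
        intro y hy
        exact head_dropWhile_key k xs y (by rw [← hdw]; simpa using hy)
      have hrunkey : ∀ l ∈ x :: tw, pvIsTable l = k := by
        intro l hl
        rcases List.mem_cons.mp hl with h | h
        · subst h; rfl
        · exact mem_takeWhile_key h
      conv_lhs => rw [hsplit, List.foldl_append]
      conv_rhs => rw [hruns, List.foldl_cons]
      cases hkk : k with
      | true =>
        -- a table run: A cannot be in_table here
        have hinb : inb = false := by
          by_contra hb
          have hb' : inb = true := by revert hb; cases inb <;> simp
          have := hhead hb' x (by simp)
          rw [← hk, hkk] at this; exact absurd this (by simp)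
        subst hinb
        obtain ⟨htls, hout⟩ := hrel
        subst htls
        -- A across the run
        have hA : (x :: tw).foldl pvStepA (res, [], false) =
            ((if res ≠ [] ∧ PySem.Str.strip (res.getLast!) ≠ "" then res ++ [""] else res),
              x :: tw, true) := by
          rw [List.foldl_cons]
          have hx : pvIsTable x = true := by rw [← hk, hkk]
          have hstep : pvStepA (res, [], false) x =
              ((if res ≠ [] ∧ PySem.Str.strip (res.getLast!) ≠ "" then res ++ [""] else res),
                [x], true) := by
            simp [pvStepA, hx]
          rw [hstep, foldA_table_in tw _ [x]
            (fun l hl => by rw [hrunkey l (by simp [hl]), hkk])]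
          simp
        rw [hA]
        -- B's step on the run
        have hB : pvStepB (out, false) (true, x :: tw) =
            ((if out ≠ [] ∧ PySem.Str.strip (out.getLast!) ≠ "" then out ++ [""] else out)
              ++ [PySem.Str.join "\n" (x :: tw)], true) := by
          simp [pvStepB]
        rw [hB]
        subst hout
        exact ih dw _ (x :: tw) true _ hdwlen
          (by simp [pvRel])
          (by intro _ y hy
              have := hdwhead y hy
              rw [hkk] at this; revert this; cases pvIsTable y <;> simp)
      | false =>
        -- a non-table run
        have hrunf : ∀ l ∈ x :: tw, pvIsTable l = false := by
          intro l hl; rw [hrunkey l hl, hkk]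
        cases inb with
        | true =>
          obtain ⟨htls, hout⟩ := hrel
          -- A: first line flushes the table, rest append
          have hA : (x :: tw).foldl pvStepA (res, tls, true) =
              (res ++ [PySem.Str.join "\n" tls, "", x] ++ tw, [], false) := by
            rw [List.foldl_cons]
            have hx : pvIsTable x = false := hrunf x (by simp)
            have hstep : pvStepA (res, tls, true) x =
                (res ++ [PySem.Str.join "\n" tls, "", x], [], false) := by
              simp [pvStepA, hx]
            rw [hstep, foldA_plain tw _ (fun l hl => hrunf l (by simp [hl]))]
          rw [hA]
          have hB : pvStepB (out, true) (false, x :: tw) =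
              (out ++ [""] ++ (x :: tw), false) := by
            simp [pvStepB]
          rw [hB]
          subst hout
          refine ih dw _ [] false _ hdwlen (by simp [pvRel]) (by simp)
        | false =>
          obtain ⟨htls, hout⟩ := hrel
          subst htls
          have hA : (x :: tw).foldl pvStepA (res, [], false) =
              (res ++ (x :: tw), [], false) :=
            foldA_plain _ _ hrunf
          rw [hA]
          have hB : pvStepB (out, false) (false, x :: tw) = (out ++ (x :: tw), false) := by
            simp [pvStepB]
          rw [hB]
          subst hout
          exact ih dw _ [] false _ hdwlen (by simp [pvRel]) (by simp)

-- ===== VERDICT (by name: the statement is the Claim_ definition above) =====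
theorem protect_tables_py_spec : Claim_equal_protect_tables_py := by
  intro text _
  unfold Spec_protect_tables_py protect_tables_py protect_tables_py_alt
  have := main_lemma ((PySem.Str.split? text "\n").getD []).length
      ((PySem.Str.split? text "\n").getD []) [] [] false [] le_rfl ⟨rfl, rfl⟩ (by simp)
  simp only at this ⊢
  rw [this]
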